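-- pv_equiv track=rewrite | github.com/dsb4k8/Python-Freshman-Assignments | Cyphertxt/Ciphertxt.py | untranspose
-- ===== SOURCE A (Python) =====
-- import math
--
-- def untranspose(message):
--     new_message = ""
--     for line in message:
--         new_line = ""
--         even_char = line[:math.ceil(len(line.replace("\n", "")) / 2)]
--         odd_char = line[math.ceil(len(line.replace("\n", "")) / 2):]
--         count = 0
--         e_count = 0
--         o_count = 0
--         while count < len(line.replace("\n", "")):
--             if count % 2 == 0:
--                 new_line = new_line + even_char[e_count]
--                 e_count += 1
--             else:
--                 new_line = new_line + odd_char[o_count]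
--                 o_count += 1
--             count += 1
--         new_message = new_message + new_line + "\n"
--     return new_message
-- ===== SOURCE B (Python) =====
-- def untranspose(message):
--     out = []
--     for line in message:
--         L = len(line) - line.count("\n")
--         half = (L + 1) // 2
--         res = [""] * L
--         res[0::2] = line[:half]
--         res[1::2] = line[half:half + L // 2]
--         out.append("".join(res) + "\n")
--     return "".join(out)
-- ===== Notes on version B (the rewrite author's own statement) =====
-- stated objective: simpler
-- what changed: Replaces A's counter-driven while loop (count/e_count/o_count with per-iteration parity test, per-character string concatenation and repeated len(line.replace(...)) recomputation) by strided slice assignment: res[0::2] = line[:half], res[1::2] = line[half:half+L//2], joined once per line.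
import Mathlib
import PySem

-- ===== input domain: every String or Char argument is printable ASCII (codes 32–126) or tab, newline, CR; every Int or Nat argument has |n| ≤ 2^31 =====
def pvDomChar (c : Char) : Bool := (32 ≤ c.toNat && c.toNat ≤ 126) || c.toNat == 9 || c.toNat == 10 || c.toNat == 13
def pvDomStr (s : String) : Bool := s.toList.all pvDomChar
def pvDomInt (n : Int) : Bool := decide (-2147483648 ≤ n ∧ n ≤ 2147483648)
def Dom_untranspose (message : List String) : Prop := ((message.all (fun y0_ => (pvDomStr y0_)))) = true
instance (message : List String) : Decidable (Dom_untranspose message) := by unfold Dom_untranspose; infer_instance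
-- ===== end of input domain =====

-- B un-interleaves each line by strided slice assignment instead of A's counter-driven
-- while loop; objective: simpler.  Equality proved on the whole domain.

-- ===== PORT A =====
-- A's while loop: count scans 0..L-1, appending even_char[e_count] / odd_char[o_count].
-- Python indexing even_char[e_count] is always in range here (e_count < half ≤ len(line),
-- o_count < L/2 ≤ len(line) - half), so the getD default ' ' is never used.
def untransposeLoop (evenChar oddChar : List Char) (L count eCount oCount : Nat)
    (newLine : List Char) : List Char :=
  if count < L then
    if count % 2 = 0 then
      untransposeLoop evenChar oddChar L (count + 1) (eCount + 1) oCount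
        (newLine ++ [evenChar.getD eCount ' '])
    else
      untransposeLoop evenChar oddChar L (count + 1) eCount (oCount + 1)
        (newLine ++ [oddChar.getD oCount ' '])
  else newLine
termination_by L - count
decreasing_by all_goals omega

-- one iteration of A's 'for line in message' body, as List Char; '+' on str = '++',
-- line.replace("\n","") = filter (exact: removes every '\n'), math.ceil(len/2) = (len+1)/2
-- (exact: float ceil of a half-integer at these sizes), line[:k] / line[k:] with 0 ≤ k
-- are List.take / List.drop (exact: Python slices clamp like take/drop).
def untransposeLine (line : String) : List Char :=
  let s := line.toList
  let stripped := s.filter (fun c => c != '\n')        -- line.replace("\n", "")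
  let half := (stripped.length + 1) / 2                -- math.ceil(len(...) / 2)
  let evenChar := s.take half                          -- line[:half]
  let oddChar := s.drop half                           -- line[half:]
  untransposeLoop evenChar oddChar stripped.length 0 0 0 [] ++ ['\n']

def untranspose (message : List String) : String :=
  String.mk (message.foldl (fun newMessage line => newMessage ++ untransposeLine line) [])

-- ===== PORT B =====
-- res[0::2] = evens; res[1::2] = odds over res of len L: len(evens) = ceil(L/2) and
-- len(odds) = L//2 always hold here, so both slice assignments fit exactly and the result
-- is the exact interleaving starting with evens (ports the strided assignment faithfully).
def strideInterleave (evens odds : List Char) : List Char :=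
  match evens with
  | [] => []
  | e :: es => e :: strideInterleave odds es
termination_by evens.length + odds.length
decreasing_by simp; omega

def untransposeAltLine (line : String) : List Char :=
  let s := line.toList
  let L := s.length - s.count '\n'                     -- len(line) - line.count("\n")
  let half := (L + 1) / 2
  strideInterleave (s.take half) ((s.drop half).take (L / 2)) ++ ['\n']

def untranspose_alt (message : List String) : String :=
  String.mk ((message.map untransposeAltLine).flatten)

-- ===== PRECONDITION & SPEC =====
def Spec_untranspose (message : List String) (out : String) : Prop := out = untranspose_alt message
instance (message : List String) (out : String) : Decidable (Spec_untranspose message out) := by unfold Spec_untranspose; infer_instance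

-- ===== CLAIM (what is proved, stated in full; the proofs are below) =====
def Claim_equal_untranspose : Prop := ∀ (message : List String), Dom_untranspose message → Spec_untranspose message (untranspose message)

-- ===== LEMMAS AND PROOFS =====

-- proof-only skeleton of the loop: k alternating picks, swapping the two lists each step
def mixAux : Nat → List Char → List Char → List Char
  | 0, _, _ => []
  | k + 1, E, O => E.headD ' ' :: mixAux k O E.tail

theorem getD_eq_headD_drop (l : List Char) (n : Nat) (d : Char) :
    l.getD n d = (l.drop n).headD d := by
  induction l generalizing n with
  | nil => simp
  | cons c cs ih =>
    cases n with
    | zero => simp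
    | succ n => simpa using ih n

theorem tail_drop' (l : List Char) (n : Nat) : (l.drop n).tail = l.drop (n + 1) := by
  rw [← List.drop_drop]
  simp [List.drop_one]

theorem untransposeLoop_eq_mixAux (L : Nat) :
    ∀ k count eCount oCount (E O acc : List Char), L - count = k →
    untransposeLoop E O L count eCount oCount acc =
      acc ++ (if count % 2 = 0 then mixAux k (E.drop eCount) (O.drop oCount)
              else mixAux k (O.drop oCount) (E.drop eCount)) := by
  intro k
  induction k with
  | zero =>
    intro count eCount oCount E O acc h
    rw [untransposeLoop]
    have : ¬ count < L := by omega
    simp [this, mixAux]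
  | succ k ih =>
    intro count eCount oCount E O acc h
    have hlt : count < L := by omega
    rw [untransposeLoop]
    by_cases hp : count % 2 = 0
    · have hp1 : (count + 1) % 2 = 1 := by omega
      simp only [hlt, if_true, hp, if_true]
      rw [ih (count + 1) (eCount + 1) oCount E O _ (by omega)]
      simp [hp1, mixAux, getD_eq_headD_drop, tail_drop']
    · have hp1 : (count + 1) % 2 = 0 := by omega
      simp only [hlt, if_true, hp, if_false]
      rw [ih (count + 1) eCount (oCount + 1) E O _ (by omega)]
      simp [hp1, mixAux, getD_eq_headD_drop, tail_drop']

theorem mixAux_eq_strideInterleave :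
    ∀ (k : Nat) (E O : List Char), (k + 1) / 2 ≤ E.length → k / 2 ≤ O.length →
    mixAux k E O = strideInterleave (E.take ((k + 1) / 2)) (O.take (k / 2)) := by
  intro k
  induction k with
  | zero =>
    intro E O _ _
    have h : (0 + 1) / 2 = 0 := by norm_num
    simp only [mixAux, h, Nat.zero_div, List.take_zero]
    rw [strideInterleave]
  | succ k ih =>
    intro E O hE hO
    obtain ⟨c, es, rfl⟩ : ∃ c es, E = c :: es := by
      cases E with
      | nil => simp at hE
      | cons c es => exact ⟨c, es, rfl⟩
    have h1 : (k + 1 + 1) / 2 = k / 2 + 1 := by omega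
    have h2 : (k + 1) / 2 ≤ O.length := by omega
    have h3 : k / 2 ≤ es.length := by simp at hE; omega
    simp only [mixAux, List.headD_cons, List.tail_cons, h1, List.take_succ_cons]
    rw [ih O es h2 h3, strideInterleave]

theorem length_filter_ne_newline (s : List Char) :
    (s.filter (fun c => c != '\n')).length = s.length - s.count '\n' := by
  induction s with
  | nil => simp
  | cons c cs ih =>
    have hc : cs.count '\n' ≤ cs.length := List.count_le_length
    by_cases h : c = '\n'
    · subst h; simp [ih]
    · simp [List.filter_cons, List.count_cons, h, ih]
      omega

theorem perLine_eq (line : String) : untransposeLine line = untransposeAltLine line := by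
  unfold untransposeLine untransposeAltLine
  simp only []
  set s := line.toList
  rw [length_filter_ne_newline s]
  set L := s.length - s.count '\n' with hLdef
  have hLlen : L ≤ s.length := by omega
  set half := (L + 1) / 2 with hhalf
  rw [untransposeLoop_eq_mixAux L L 0 0 0 (s.take half) (s.drop half) [] (by omega)]
  simp only [Nat.zero_mod, if_pos rfl, List.drop_zero, List.nil_append]
  rw [mixAux_eq_strideInterleave L (s.take half) (s.drop half)
      (by simp; omega) (by simp; omega)]
  have h : (s.take half).take ((L + 1) / 2) = s.take half := by
    rw [List.take_take]; congr 1; omega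
  rw [h]
  simp

-- ===== VERDICT (by name: the statement is the Claim_ definition above) =====
theorem untranspose_spec : Claim_equal_untranspose := by
  intro message _
  unfold Spec_untranspose untranspose untranspose_alt
  congr 1
  rw [PySem.List.foldl_append_eq_flatMap (g := untransposeLine)]
  simp only [List.nil_append, List.flatMap_def]
  congr 1
  exact List.map_congr_left (fun line _ => perLine_eq line)
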